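-- pv_equiv track=rewrite | github.com/animeshokhade/dsa | scaler/Subarrays with Bitwise OR 1.py | solve
-- ===== SOURCE A (Python) =====
-- def solve(A, B):
--     n = len(B)
--     sub_array = (n * (n + 1)) // 2
--     if 0 not in B:
--         return sub_array
--     else:
--         consecutive_zeros = 0
--         flag = True
--         for i in range(n):
--             if B[i] == 0:
--                 if flag:
--                     start = i
--                 flag = False
--             else:
--                 if not flag:
--                     end = i
--                     consecutive_zeros += ((end - start + 1) * (end - start)) // 2
--                 flag = True
--
--         if B[n - 1] == 0:
--             end = n
--             consecutive_zeros += ((end - start + 1) * (end - start)) // 2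
--
--     return sub_array - consecutive_zeros
-- ===== SOURCE B (Python) =====
-- def solve(A, B):
--     ans = 0
--     last = -1
--     for i, x in enumerate(B):
--         if x != 0:
--             last = i
--         ans += last + 1
--     return ans
-- ===== Notes on version B (the rewrite author's own statement) =====
-- stated objective: simpler
-- what changed: Replaces A's total-count-minus-zero-run-triangles bookkeeping (membership pre-test, run start/end state machine, trailing-run patch) with a single pass that, for each ending index i, adds last_nonzero_index+1 directly.
import Mathlib
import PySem

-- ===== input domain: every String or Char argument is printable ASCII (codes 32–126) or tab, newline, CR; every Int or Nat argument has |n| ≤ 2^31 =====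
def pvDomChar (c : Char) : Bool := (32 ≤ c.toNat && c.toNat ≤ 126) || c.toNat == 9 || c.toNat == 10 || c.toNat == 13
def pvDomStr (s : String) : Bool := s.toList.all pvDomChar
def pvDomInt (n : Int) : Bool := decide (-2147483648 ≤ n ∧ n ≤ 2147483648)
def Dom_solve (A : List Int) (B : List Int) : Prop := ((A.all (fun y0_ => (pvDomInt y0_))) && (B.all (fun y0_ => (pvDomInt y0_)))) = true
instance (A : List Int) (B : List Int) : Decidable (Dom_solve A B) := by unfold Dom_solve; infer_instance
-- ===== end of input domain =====

-- B counts subarrays with a nonzero OR by directly summing, per ending index, last_nonzero_index+1,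
-- instead of A's total-minus-zero-run-triangles bookkeeping; same O(n), simpler.

-- ===== PORT A =====
-- Literal port of A. Python's `start`/`end` are only ever read after being assigned
-- (reads happen only with flag = False, resp. inside the 0 ∈ B branch), so the
-- initial value 0 for `start` in the fold state is never observed.
def solve (A : List Int) (B : List Int) : Int :=
  let n : Int := B.length
  let sub_array : Int := PySem.Int.floordiv (n * (n + 1)) 2
  if 0 ∉ B then sub_array
  else
    let st := (PySem.List.pyRange 0 n 1).foldl
      (fun (s : Int × Bool × Int) (i : Int) =>
        if PySem.List.pyGetD B i 0 == 0 then
          (s.1, false, if s.2.1 then i else s.2.2)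
        else
          if !s.2.1 then
            (s.1 + PySem.Int.floordiv ((i - s.2.2 + 1) * (i - s.2.2)) 2, true, s.2.2)
          else (s.1, true, s.2.2))
      (0, true, 0)
    let consecutive_zeros : Int :=
      if PySem.List.pyGetD B (n - 1) 0 == 0 then
        st.1 + PySem.Int.floordiv ((n - st.2.2 + 1) * (n - st.2.2)) 2
      else st.1
    sub_array - consecutive_zeros

-- ===== PORT B =====
def solve_alt (A : List Int) (B : List Int) : Int :=
  ((PySem.List.enumerate B 0).foldl
    (fun (s : Int × Int) (p : Int × Int) =>
      let last := if p.2 ≠ 0 then p.1 else s.2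
      (s.1 + last + 1, last)) (0, -1)).1

-- ===== PRECONDITION & SPEC =====
def Spec_solve (A : List Int) (B : List Int) (out : Int) : Prop := out = solve_alt A B
instance (A : List Int) (B : List Int) (out : Int) : Decidable (Spec_solve A B out) := by unfold Spec_solve; infer_instance

-- ===== CLAIM (what is proved, stated in full; the proofs are below) =====
def Claim_equal_solve : Prop := ∀ (A : List Int) (B : List Int), Dom_solve A B → Spec_solve A B (solve A B)

-- ===== LEMMAS AND PROOFS =====

-- triangular number via Python floor division (exact: (m+1)*m is always even)
def trig (m : Int) : Int := PySem.Int.floordiv ((m + 1) * m) 2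

-- A's loop body, on (index, element) pairs
def gA (s : Int × Bool × Int) (p : Int × Int) : Int × Bool × Int :=
  if p.2 == 0 then (s.1, false, if s.2.1 then p.1 else s.2.2)
  else
    if !s.2.1 then (s.1 + trig (p.1 - s.2.2), true, s.2.2)
    else (s.1, true, s.2.2)

-- B's loop body
def gB (s : Int × Int) (p : Int × Int) : Int × Int :=
  let last := if p.2 ≠ 0 then p.1 else s.2
  (s.1 + last + 1, last)

lemma two_mul_trig (m : Int) : 2 * trig m = (m + 1) * m := by
  rcases Int.even_mul_succ_self m with ⟨k, hk⟩
  have h2 : (m + 1) * m = 2 * k := by rw [mul_comm]; omega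
  unfold trig
  rw [h2, PySem.Int.floordiv_eq_ediv_of_pos (by norm_num), Int.mul_ediv_cancel_left _ (by norm_num)]

lemma trig_succ (m : Int) : trig (m + 1) = trig m + (m + 1) := by
  have h1 := two_mul_trig m
  have h2 := two_mul_trig (m + 1)
  nlinarith

lemma trig_zero : trig 0 = 0 := by decide
lemma trig_one : trig 1 = 1 := by decide

-- Main invariant: running both loop bodies over the same indexed tail preserves the
-- relation between B's (ans, last) and A's (cz, flag, start), and at the end B's
-- accumulator equals A's final adjusted value.
lemma key (l : List Int) : ∀ (i cz start ans last : Int) (flag : Bool),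
    last = (if flag then i - 1 else start - 1) →
    ans = trig i - cz - (if flag then 0 else trig (i - start)) →
    (((PySem.List.enumerate l i).foldl gB (ans, last)).2
       = (if ((PySem.List.enumerate l i).foldl gA (cz, flag, start)).2.1
          then i + l.length - 1
          else ((PySem.List.enumerate l i).foldl gA (cz, flag, start)).2.2 - 1)) ∧
    (((PySem.List.enumerate l i).foldl gB (ans, last)).1
       = trig (i + l.length)
         - ((PySem.List.enumerate l i).foldl gA (cz, flag, start)).1
         - (if ((PySem.List.enumerate l i).foldl gA (cz, flag, start)).2.1 then 0
            else trig (i + l.length - ((PySem.List.enumerate l i).foldl gA (cz, flag, start)).2.2))) := by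
  induction l with
  | nil =>
    intro i cz start ans last flag hlast hans
    simp only [PySem.List.enumerate_nil, List.foldl_nil, List.length_nil]
    constructor
    · cases flag <;> simp_all
    · cases flag <;> simp_all <;> omega
  | cons x xs ih =>
    intro i cz start ans last flag hlast hans
    rw [PySem.List.enumerate_cons]
    simp only [List.foldl_cons, List.length_cons]
    by_cases hx : x = 0
    · cases flag
      · -- flag = false, x = 0 : zero run continues
        have hA : gA (cz, false, start) (i, x) = (cz, false, start) := by
          simp [gA, hx]
        have hB : gB (ans, last) (i, x) = (ans + start, start - 1) := by
          simp only [Bool.false_eq_true, if_false] at hlast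
          simp [gB, hx, hlast]; omega
        rw [hA, hB]
        have hstep : trig (i + 1 - start) = trig (i - start) + (i - start + 1) := by
          have := trig_succ (i - start)
          have e : i + 1 - start = (i - start) + 1 := by ring
          rw [e]; omega
        have := ih (i + 1) cz start (ans + start) (start - 1) false
          (by simp) (by simp only [Bool.false_eq_true, if_false] at hans ⊢; rw [hstep, trig_succ i]; omega)
        constructor
        · rw [this.1]; push_cast; ring_nf
        · rw [this.2]; push_cast; ring_nf
      · -- flag = true, x = 0 : zero run starts at i
        have hA : gA (cz, true, start) (i, x) = (cz, false, i) := by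
          simp [gA, hx]
        have hB : gB (ans, last) (i, x) = (ans + i, i - 1) := by
          simp only [if_pos] at hlast
          simp [gB, hx, hlast]; omega
        rw [hA, hB]
        have := ih (i + 1) cz i (ans + i) (i - 1) false
          (by simp)
          (by
            simp only [if_pos, Bool.false_eq_true, if_false] at hans ⊢
            have e : i + 1 - i = (1 : Int) := by ring
            rw [e, trig_one, trig_succ i]; omega)
        constructor
        · rw [this.1]; push_cast; ring_nf
        · rw [this.2]; push_cast; ring_nf
    · cases flag
      · -- flag = false, x ≠ 0 : zero run [start, i) closes
        have hA : gA (cz, false, start) (i, x) = (cz + trig (i - start), true, start) := by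
          simp [gA, hx]
        have hB : gB (ans, last) (i, x) = (ans + i + 1, i) := by
          simp [gB, hx]
        rw [hA, hB]
        have := ih (i + 1) (cz + trig (i - start)) start (ans + i + 1) i true
          (by simp)
          (by simp only [Bool.false_eq_true, if_false, if_pos] at hans ⊢; rw [trig_succ i]; omega)
        constructor
        · rw [this.1]; push_cast; ring_nf
        · rw [this.2]; push_cast; ring_nf
      · -- flag = true, x ≠ 0
        have hA : gA (cz, true, start) (i, x) = (cz, true, start) := by
          simp [gA, hx]
        have hB : gB (ans, last) (i, x) = (ans + i + 1, i) := by
          simp [gB, hx]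
        rw [hA, hB]
        have := ih (i + 1) cz start (ans + i + 1) i true
          (by simp)
          (by simp only [if_pos] at hans ⊢; rw [trig_succ i]; omega)
        constructor
        · rw [this.1]; push_cast; ring_nf
        · rw [this.2]; push_cast; ring_nf

-- After the loop, flag records whether the LAST element is nonzero.
lemma flag_last (l : List Int) : ∀ (i : Int) (s : Int × Bool × Int),
    ((PySem.List.enumerate l i).foldl gA s).2.1
      = (match l.getLast? with
         | none => s.2.1
         | some x => !(x == 0)) := by
  induction l with
  | nil => intro i s; simp [PySem.List.enumerate_nil]
  | cons x xs ih =>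
    intro i s
    rw [PySem.List.enumerate_cons]
    simp only [List.foldl_cons]
    rw [ih]
    cases xs with
    | nil =>
      by_cases hx : x = 0
      · simp [gA, hx]
      · cases hs : s.2.1 <;> simp [gA, hx, hs]
    | cons z zs =>
      rw [List.getLast?_cons_cons, List.getLast?_eq_some_getLast (l := z :: zs) (by simp)]

-- With no zeros and flag already true, A's loop state never changes.
lemma no_zero_fixed (l : List Int) : ∀ (i cz start : Int), (0 : Int) ∉ l →
    (PySem.List.enumerate l i).foldl gA (cz, true, start) = (cz, true, start) := by
  induction l with
  | nil => intro i cz start _; simp [PySem.List.enumerate_nil]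
  | cons x xs ih =>
    intro i cz start h
    have hx : x ≠ 0 := fun e => h (e ▸ List.mem_cons_self)
    rw [PySem.List.enumerate_cons]
    simp only [List.foldl_cons]
    have : gA (cz, true, start) (i, x) = (cz, true, start) := by simp [gA, hx]
    rw [this, ih _ _ _ (fun hm => h (List.mem_cons_of_mem _ hm))]

-- sub_array = trig n
lemma sub_array_eq (n : Int) : PySem.Int.floordiv (n * (n + 1)) 2 = trig n := by
  unfold trig; rw [mul_comm]

-- ===== VERDICT (by name: the statement is the Claim_ definition above) =====
theorem solve_spec : Claim_equal_solve := by
  unfold Claim_equal_solve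
  intro A B _
  unfold Spec_solve solve solve_alt
  simp only []
  -- rewrite A's index-loop as a fold over enumerate, with gA as the body
  have hfoldA : ∀ init : Int × Bool × Int,
      (PySem.List.pyRange 0 (B.length : Int) 1).foldl
        (fun (s : Int × Bool × Int) (i : Int) =>
          if PySem.List.pyGetD B i 0 == 0 then
            (s.1, false, if s.2.1 then i else s.2.2)
          else
            if !s.2.1 then
              (s.1 + PySem.Int.floordiv ((i - s.2.2 + 1) * (i - s.2.2)) 2, true, s.2.2)
            else (s.1, true, s.2.2)) init
      = (PySem.List.enumerate B 0).foldl gA init := by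
    intro init
    rw [PySem.List.enumerate_eq_map_pyRange (d := 0), List.foldl_map]
    simp only [PySem.List.len_eq]
    rfl
  -- B's fold body is gB
  have hfoldB :
      (PySem.List.enumerate B 0).foldl
        (fun (s : Int × Int) (p : Int × Int) =>
          let last := if p.2 ≠ 0 then p.1 else s.2
          (s.1 + last + 1, last)) (0, -1)
      = (PySem.List.enumerate B 0).foldl gB (0, -1) := rfl
  have hkey := (key B 0 0 0 0 (-1) true (by simp) (by simp [trig_zero])).2
  by_cases hmem : (0 : Int) ∈ B
  · simp only [hmem, not_true_eq_false, if_neg, if_false]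
    rw [hfoldA, hfoldB]
    have hne : B ≠ [] := by rintro rfl; simp at hmem
    have hlast : PySem.List.pyGetD B ((B.length : Int) - 1) 0 = B.getLast hne := by
      have hlen : 0 < B.length := List.length_pos_iff.mpr hne
      rw [PySem.List.pyGetD_eq_getElem B 0 (by omega) (by omega)]
      rw [List.getLast_eq_getElem]
      congr 1
      omega
    rw [hlast]
    have hflag := flag_last B 0 (0, true, 0)
    rw [List.getLast?_eq_some_getLast hne] at hflag
    set r := (PySem.List.enumerate B 0).foldl gA (0, true, 0) with hr
    simp only [zero_add] at hkey
    by_cases hz : B.getLast hne = 0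
    · have hf : r.2.1 = false := by rw [hflag]; simp [hz]
      rw [hkey, sub_array_eq, hf]
      simp [hz, trig]
      ring_nf
    · have hf : r.2.1 = true := by rw [hflag]; simp [hz]
      rw [hkey, sub_array_eq, hf]
      simp [hz]
  · simp only [hmem, not_false_eq_true, if_pos, if_true]
    rw [hfoldB]
    rw [hkey, no_zero_fixed B 0 0 0 hmem, sub_array_eq]
    simp
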